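-- pv_equiv track=rewrite | github.com/hulahula3247/CSE4152-exam | f3-playing-musicbox/main.py | solve
-- ===== SOURCE A (Python) =====
-- def solve(N, K, S):
--     def can(X: int) -> bool:
--         seg = 1
--         l = 0          # start index of current segment in S
--         pi = []        # prefix-function for current segment
--         L = 0          # length of current segment
--
--         for i in range(N):
--             # append S[i] to current segment, update prefix function
--             if L == 0:
--                 pi = [0]
--                 L = 1
--                 l = i
--             else:
--                 k = pi[-1]
--                 while k > 0 and S[l + k] != S[i]:
--                     k = pi[k - 1]
--                 if S[l + k] == S[i]:
--                     k += 1
--                 pi.append(k)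
--                 L += 1
--
--             period = L - pi[-1]
--             if period > X:
--                 seg += 1
--                 if seg > K:
--                     return False
--                 l = i
--                 pi = [0]
--                 L = 1
--
--         return True
--
--     lo, hi = 0, N
--     while lo+1 < hi:
--         mid = (lo+hi)//2
--         if can(mid): hi = mid
--         else: lo = mid
--     return hi
-- ===== SOURCE B (Python) =====
-- def solve(N, K, S):
--     # Minimax-partition DP: answer = min over partitions of S[:N] into at most
--     # max(1, min(K, N)) segments of the maximum minimal-period of a segment.
--     if N <= 0:
--         return 0
--
--     def per_row(j):
--         # row[i] = minimal period of S[j:i] for j < i <= N (prefix-function pass)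
--         row = [0] * (j + 1) + [1]
--         pi = [0]
--         k = 0
--         for t in range(1, N - j):
--             while k > 0 and S[j + t] != S[j + k]:
--                 k = pi[k - 1]
--             if S[j + t] == S[j + k]:
--                 k += 1
--             pi.append(k)
--             row.append(t + 1 - k)
--         return row
--
--     per = [per_row(j) for j in range(N)]
--     INF = N + 1
--     keff = max(1, min(K, N))
--     dp = [0] + [INF] * N
--     for _ in range(keff):
--         dp = [0] + [min(min(max(dp[j], per[j][i]) for j in range(i)), dp[i])
--                     for i in range(1, N + 1)]
--     return dp[N]
-- ===== Notes on version B (the rewrite author's own statement) =====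
-- stated objective: alternative
-- what changed: Replaces the binary search over the period threshold X with its greedy early-exit KMP feasibility check by a direct minimax-partition DP: one prefix-function pass per start j yields the minimal period of every segment S[j:i], and dp[k][i] = min over split points j of max(dp[k-1][j], period(S[j:i])) with at most max(1, min(K, N)) segments gives the answer without any search over X.
-- outside the precondition, e.g. on solve(-3, 2, 'ab'): A returns -3, B returns 0; on solve(1, 2, ''): A returns 1, B returns 1
import Mathlib
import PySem

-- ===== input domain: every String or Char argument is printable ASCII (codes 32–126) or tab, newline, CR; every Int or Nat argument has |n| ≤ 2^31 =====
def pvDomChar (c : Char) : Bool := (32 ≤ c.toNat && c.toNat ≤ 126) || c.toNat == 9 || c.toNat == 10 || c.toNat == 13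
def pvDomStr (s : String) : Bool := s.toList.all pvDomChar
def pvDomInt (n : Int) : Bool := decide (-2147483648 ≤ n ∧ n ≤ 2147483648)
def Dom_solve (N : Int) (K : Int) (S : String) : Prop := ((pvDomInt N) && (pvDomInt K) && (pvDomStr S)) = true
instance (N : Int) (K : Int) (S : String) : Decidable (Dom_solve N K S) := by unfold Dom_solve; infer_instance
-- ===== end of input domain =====

-- B rewrites A's binary search over the threshold X (with a greedy early-exit KMP check) into a
-- direct minimax-partition DP over split points and segment counts; equivalence proved on 0 ≤ N ≤ len(S).

-- ===== PORT A =====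
-- S[i] (A only ever uses nonnegative, in-range indices on inputs admitted by Pre_solve)
def pvC (cs : List Char) (i : Nat) : Char := cs.getD i ' '

-- `while k > 0 and S[l + k] != S[i]: k = pi[k - 1]` — fuel-counted with fuel = entry k
-- (each step has pi[k-1] < k on every reachable state, so the fuel is never exhausted)
def pvFall (cs : List Char) (l : Nat) (c : Char) : Nat → List Nat → Nat → Nat
  | 0, _, k => k
  | fuel+1, pi, k =>
      if 0 < k ∧ pvC cs (l + k) ≠ c then pvFall cs l c fuel pi (pi.getD (k-1) 0) else k

-- the new prefix-function entry for character S[i]: k = pi[-1]; the while loop; the final match test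
def pvStep (cs : List Char) (l : Nat) (pi : List Nat) (L i : Nat) : Nat :=
  let k0 := pi.getD (L-1) 0
  let k1 := pvFall cs l (pvC cs i) k0 pi k0
  if pvC cs (l + k1) = pvC cs i then k1 + 1 else k1

-- the `for i in range(N)` body of A's `can`, with the early `return False`
def pvCanGo (cs : List Char) (n : Nat) (K X : Int) (i : Nat) (seg : Int)
    (l : Nat) (pi : List Nat) (L : Nat) : Bool :=
  if _h : i < n then
    let st : Nat × List Nat × Nat :=
      if L = 0 then (i, [0], 1)
      else (l, pi ++ [pvStep cs l pi L i], L + 1)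
    let period : Int := (st.2.2 : Int) - ((st.2.1.getD (st.2.2 - 1) 0 : Nat) : Int)
    if period > X then
      if seg + 1 > K then false
      else pvCanGo cs n K X (i+1) (seg+1) i [0] 1
    else pvCanGo cs n K X (i+1) seg st.1 st.2.1 st.2.2
  else true
  termination_by n - i

def pvCan (cs : List Char) (n : Nat) (K X : Int) : Bool :=
  pvCanGo cs n K X 0 1 0 [] 0

-- `lo, hi = 0, N; while lo+1 < hi: …; return hi`
def pvBS (cs : List Char) (n : Nat) (K : Int) (lo hi : Int) : Int :=
  if _h : lo + 1 < hi then
    if pvCan cs n K (PySem.Int.floordiv (lo + hi) 2) then pvBS cs n K lo (PySem.Int.floordiv (lo + hi) 2)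
    else pvBS cs n K (PySem.Int.floordiv (lo + hi) 2) hi
  else hi
  termination_by (hi - lo).toNat
  decreasing_by
  all_goals
    have h1 := (PySem.Int.le_floordiv_iff_mul_le (a := lo + hi) (b := 2) (q := lo+1) (by omega)).2 (by omega)
    have h2 := (PySem.Int.floordiv_lt_iff_lt_mul (a := lo + hi) (b := 2) (q := hi) (by omega)).2 (by omega)
    omega

def solve (N : Int) (K : Int) (S : String) : Int :=
  pvBS S.toList N.toNat K 0 N

-- ===== PORT B =====
-- `while k > 0 and S[j + t] != S[j + k]: k = pi[k - 1]` of B's per_row, fuel-counted as in A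
def pvFallB (cs : List Char) (j t : Nat) : Nat → List Nat → Nat → Nat
  | 0, _, k => k
  | fuel+1, pi, k =>
      if 0 < k ∧ cs.getD (j + t) ' ' ≠ cs.getD (j + k) ' ' then
        pvFallB cs j t fuel pi (pi.getD (k-1) 0)
      else k

-- one iteration of per_row's `for t in range(1, N - j)` body
def pvRowStep (cs : List Char) (j : Nat) (st : List Nat × Nat × List Int) (t : Nat) :
    List Nat × Nat × List Int :=
  let k1 := pvFallB cs j t st.2.1 st.1 st.2.1
  let k2 := if cs.getD (j + t) ' ' = cs.getD (j + k1) ' ' then k1 + 1 else k1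
  (st.1 ++ [k2], k2, st.2.2 ++ [((t:Int) + 1) - (k2:Int)])

-- per_row(j): row[i] = minimal period of S[j:i] for j < i ≤ N, one prefix-function pass
def pvPerRow (cs : List Char) (n j : Nat) : List Int :=
  let init : List Int := (List.replicate (j+1) (0:Int)) ++ [1]
  ((List.range' 1 (n - j - 1)).foldl (pvRowStep cs j) ([0], 0, init)).2.2

-- python `min` over a nonempty sequence
def pvPyMin (xs : List Int) : Int :=
  match xs with
  | [] => 0
  | x :: r => r.foldl min x

-- one round: dp = [0] + [min(min(max(dp[j], per[j][i]) for j in range(i)), dp[i]) for i in 1..N]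
def pvDpStep (per : List (List Int)) (n : Nat) (dp : List Int) : List Int :=
  (0:Int) :: (List.range' 1 n).map (fun i =>
    min (pvPyMin ((List.range i).map (fun j =>
          max (dp.getD j 0) ((per.getD j []).getD i 0)))) (dp.getD i 0))

def solve_alt (N : Int) (K : Int) (S : String) : Int :=
  if N ≤ 0 then 0
  else
    let cs := S.toList
    let n := N.toNat
    let per := (List.range n).map (pvPerRow cs n)
    let keff : Int := max 1 (min K N)
    let dp := (pvDpStep per n)^[keff.toNat] ((0:Int) :: List.replicate n (N + 1))
    dp.getD n 0

-- ===== PRECONDITION & SPEC =====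
-- Pre_ restricts to the natural domain: 0 ≤ N (for N < 0 A returns N itself, an artifact of the
-- unentered while loop; B returns 0) and N ≤ len(S) (for N ≥ 2 beyond len(S) both sides raise
-- IndexError; at N = 1 > len(S) both A and B return 1 without touching S).
def Pre_solve (N : Int) (K : Int) (S : String) : Prop :=
  0 ≤ N ∧ N ≤ PySem.Str.len S
instance (N : Int) (K : Int) (S : String) : Decidable (Pre_solve N K S) := by
  unfold Pre_solve; infer_instance

def pvWitness_solve : Int × Int × String := (3, 2, "aab")

def Spec_solve (N : Int) (K : Int) (S : String) (out : Int) : Prop := out = solve_alt N K S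
instance (N : Int) (K : Int) (S : String) (out : Int) : Decidable (Spec_solve N K S out) := by
  unfold Spec_solve; infer_instance

-- ===== CLAIM (what is proved, stated in full; the proofs are below) =====
def Claim_equal_solve : Prop :=
  ∀ (N : Int) (K : Int) (S : String), Dom_solve N K S → Pre_solve N K S →
    Spec_solve N K S (solve N K S)

-- ===== LEMMAS AND PROOFS =====


-- ---------- minimal periods (spec layer) ----------

-- p is a period of the slice cs[j:i) (read through getD, as the ports read characters)
abbrev sPerP (cs : List Char) (j i p : Nat) : Prop :=
  1 ≤ p ∧ ∀ t, t < i → j + p ≤ t → cs.getD t ' ' = cs.getD (t - p) ' '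

theorem sPerP_exists (cs : List Char) (j i : Nat) : ∃ p, sPerP cs j i p :=
  ⟨max 1 (i - j), ⟨by omega, fun t ht hjt => absurd ht (by omega)⟩⟩

def sPer (cs : List Char) (j i : Nat) : Nat := Nat.find (sPerP_exists cs j i)

theorem sPer_isP (cs : List Char) (j i : Nat) : sPerP cs j i (sPer cs j i) :=
  Nat.find_spec (sPerP_exists cs j i)

theorem sPer_pos (cs : List Char) (j i : Nat) : 1 ≤ sPer cs j i :=
  (sPer_isP cs j i).1

theorem sPer_min (cs : List Char) (j i p : Nat) (h : sPerP cs j i p) : sPer cs j i ≤ p :=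
  Nat.find_min' _ h

theorem sPer_le (cs : List Char) (j i : Nat) : sPer cs j i ≤ max 1 (i - j) :=
  sPer_min cs j i _ ⟨by omega, by intro t ht hjt; omega⟩

theorem sPerP_mono (cs : List Char) {j i j' i' p : Nat} (hj : j ≤ j') (hi : i' ≤ i)
    (h : sPerP cs j i p) : sPerP cs j' i' p :=
  ⟨h.1, fun t ht hjt => h.2 t (by omega) (by omega)⟩

theorem sPer_mono (cs : List Char) {j i j' i' : Nat} (hj : j ≤ j') (hi : i' ≤ i) :
    sPer cs j' i' ≤ sPer cs j i :=
  sPer_min cs j' i' _ (sPerP_mono cs hj hi (sPer_isP cs j i))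

theorem sPer_succ_self (cs : List Char) (j : Nat) : sPer cs j (j+1) = 1 :=
  le_antisymm (by have := sPer_le cs j (j+1); omega) (sPer_pos cs j (j+1))

-- ---------- borders ----------

-- b is a border of the slice cs[l:i)
abbrev sBord (cs : List Char) (l i b : Nat) : Prop :=
  l + b ≤ i ∧ ∀ t, t < b → cs.getD (l + t) ' ' = cs.getD (i - b + t) ' '

theorem sBord_zero (cs : List Char) (l i : Nat) (h : l ≤ i) : sBord cs l i 0 :=
  ⟨by omega, by intro t ht; omega⟩

-- nesting: two borders of the same slice, the smaller is a border of the larger's prefix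
theorem sBord_nest (cs : List Char) {l i b c : Nat} (hb : sBord cs l i b)
    (hc : sBord cs l i c) (hcb : c ≤ b) : sBord cs l (l + b) c := by
  have hbi := hb.1
  have hci := hc.1
  refine ⟨by omega, fun t ht => ?_⟩
  have h1 := hc.2 t ht
  have h2 := hb.2 (b - c + t) (by omega)
  have e1 : l + b - c + t = l + (b - c + t) := by omega
  have e2 : i - b + (b - c + t) = i - c + t := by omega
  rw [e2] at h2
  rw [e1, h2, ← h1]

-- a border of a border is a border
theorem sBord_trans (cs : List Char) {l i b c : Nat} (hc : sBord cs l (l + b) c)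
    (hb : sBord cs l i b) : sBord cs l i c := by
  have hcb : c ≤ b := by have := hc.1; omega
  have hbi := hb.1
  refine ⟨by omega, fun t ht => ?_⟩
  have h1 := hc.2 t ht
  have h2 := hb.2 (b - c + t) (by omega)
  have e1 : l + b - c + t = l + (b - c + t) := by omega
  have e2 : i - b + (b - c + t) = i - c + t := by omega
  rw [e1] at h1
  rw [e2] at h2
  exact h1.trans h2

-- extension: b+1 is a border of cs[l:l+m+1) iff b is a border of cs[l:l+m) matching the next char
theorem sBord_ext (cs : List Char) (l m b : Nat) (hbm : b ≤ m) :
    sBord cs l (l + (m+1)) (b+1) ↔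
      (sBord cs l (l + m) b ∧ cs.getD (l + b) ' ' = cs.getD (l + m) ' ') := by
  constructor
  · intro h
    refine ⟨⟨by omega, fun t ht => ?_⟩, ?_⟩
    · have := h.2 t (by omega)
      have e : l + (m+1) - (b+1) + t = l + m - b + t := by omega
      rw [e] at this; exact this
    · have := h.2 b (by omega)
      have e : l + (m+1) - (b+1) + b = l + m := by omega
      rw [e] at this; exact this
  · rintro ⟨hb, hc⟩
    refine ⟨by omega, fun t ht => ?_⟩
    rcases Nat.lt_or_ge t b with h | h
    · have := hb.2 t h
      have e : l + (m+1) - (b+1) + t = l + m - b + t := by omega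
      rw [e]; exact this
    · have e : l + (m+1) - (b+1) + t = l + m := by omega
      have e2 : l + t = l + b := by omega
      rw [e, e2]; exact hc

-- duality: periods of cs[l:l+m) are exactly complements of borders
theorem sBord_iff_perP (cs : List Char) (l m p : Nat) (h1 : 1 ≤ p) (h2 : p ≤ m) :
    sBord cs l (l + m) (m - p) ↔ sPerP cs l (l + m) p := by
  constructor
  · rintro ⟨_, hb⟩
    refine ⟨h1, fun t ht hpt => ?_⟩
    have := hb (t - (l + p)) (by omega)
    have e1 : l + (t - (l + p)) = t - p := by omega
    have e2 : l + m - (m - p) + (t - (l + p)) = t := by omega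
    rw [e1, e2] at this
    exact this.symm
  · rintro ⟨_, hp⟩
    refine ⟨by omega, fun t ht => ?_⟩
    have := hp (l + p + t) (by omega) (by omega)
    have e1 : l + p + t - p = l + t := by omega
    have e2 : l + m - (m - p) + t = l + p + t := by omega
    rw [e1] at this
    rw [e2, this]

-- ---------- the prefix function ----------

-- longest proper border of cs[l:l+m)
def sPhi (cs : List Char) (l m : Nat) : Nat :=
  Nat.findGreatest (fun b => b < m ∧ sBord cs l (l + m) b) m

theorem sPhi_spec (cs : List Char) (l m : Nat) (hm : 1 ≤ m) :
    sPhi cs l m < m ∧ sBord cs l (l + m) (sPhi cs l m) := by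
  have h0 : (fun b => b < m ∧ sBord cs l (l + m) b) 0 := ⟨hm, sBord_zero cs l (l+m) (by omega)⟩
  exact Nat.findGreatest_spec (P := fun b => b < m ∧ sBord cs l (l + m) b) (Nat.zero_le m) h0

theorem sPhi_greatest (cs : List Char) {l m b : Nat} (hb : b < m)
    (h : sBord cs l (l + m) b) : b ≤ sPhi cs l m :=
  Nat.le_findGreatest (by omega) ⟨hb, h⟩

theorem sPhi_one (cs : List Char) (l : Nat) : sPhi cs l 1 = 0 := by
  have := (sPhi_spec cs l 1 (by omega)).1
  omega

-- minimal period from the prefix function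
theorem sPer_eq_sub_phi (cs : List Char) (l m : Nat) (hm : 1 ≤ m) :
    sPer cs l (l + m) = m - sPhi cs l m := by
  obtain ⟨hlt, hbord⟩ := sPhi_spec cs l m hm
  apply le_antisymm
  · exact sPer_min cs l (l+m) _
      ((sBord_iff_perP cs l m (m - sPhi cs l m) (by omega) (by omega)).1
        (by have e : m - (m - sPhi cs l m) = sPhi cs l m := by omega
            rw [e]; exact hbord))
  · have hp := sPer_isP cs l (l + m)
    have h1 := sPer_pos cs l (l + m)
    rcases Nat.lt_or_ge (sPer cs l (l+m)) m with h | h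
    · have := sPhi_greatest cs (l := l) (m := m) (b := m - sPer cs l (l+m)) (by omega)
        ((sBord_iff_perP cs l m (sPer cs l (l+m)) h1 (by omega)).2 hp)
      omega
    · omega


-- ---------- correctness of the while-loop descent and of one KMP step ----------

-- the prefix-function table for the segment cs[l:l+m)
def sPiTab (cs : List Char) (l m : Nat) : List Nat :=
  (List.range m).map (fun t => sPhi cs l (t+1))

theorem sPiTab_getD (cs : List Char) (l m k : Nat) (h1 : 1 ≤ k) (hk : k ≤ m) :
    (sPiTab cs l m).getD (k-1) 0 = sPhi cs l k := by
  unfold sPiTab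
  rw [List.getD_eq_getElem _ _ (by simpa using by omega)]
  simp only [List.getElem_map, List.getElem_range]
  congr 1
  omega

theorem sPiTab_succ (cs : List Char) (l m : Nat) :
    sPiTab cs l (m+1) = sPiTab cs l m ++ [sPhi cs l (m+1)] := by
  unfold sPiTab
  rw [List.range_succ, List.map_append]
  rfl

-- what pvFall returns: a matching (or zero) border dominating every matching border
theorem pvFall_spec (cs : List Char) (l m : Nat) (c : Char) (pi : List Nat)
    (hpi : ∀ k', 1 ≤ k' → k' ≤ m → pi.getD (k'-1) 0 = sPhi cs l k') :
    ∀ fuel k, k ≤ fuel → k < m → sBord cs l (l+m) k →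
      (∀ b, b < m → sBord cs l (l+m) b → cs.getD (l+b) ' ' = c → b ≤ k) →
      (pvFall cs l c fuel pi k < m ∧ sBord cs l (l+m) (pvFall cs l c fuel pi k) ∧
       (∀ b, b < m → sBord cs l (l+m) b → cs.getD (l+b) ' ' = c → b ≤ pvFall cs l c fuel pi k) ∧
       (pvFall cs l c fuel pi k = 0 ∨ cs.getD (l + pvFall cs l c fuel pi k) ' ' = c)) := by
  intro fuel
  induction fuel with
  | zero =>
    intro k hk hkm hb hmax
    have hk0 : k = 0 := by omega
    subst hk0
    exact ⟨hkm, hb, hmax, Or.inl rfl⟩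
  | succ fuel ih =>
    intro k hk hkm hb hmax
    rw [pvFall]
    by_cases hcond : 0 < k ∧ pvC cs (l + k) ≠ c
    · rw [if_pos hcond]
      have hk1 : 1 ≤ k := hcond.1
      have hpik := hpi k hk1 (by omega)
      obtain ⟨hphlt, hphb⟩ := sPhi_spec cs l k hk1
      rw [hpik]
      apply ih (sPhi cs l k) (by omega) (by omega)
        (sBord_trans cs hphb hb)
      intro b hbm hbb hbc
      have hble : b ≤ k := hmax b hbm hbb hbc
      have hbne : b ≠ k := by
        intro h; subst h; exact hcond.2 hbc
      exact sPhi_greatest cs (by omega) (sBord_nest cs hb hbb (by omega))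
    · rw [if_neg hcond]
      refine ⟨hkm, hb, hmax, ?_⟩
      rcases Nat.eq_zero_or_pos k with h | h
      · exact Or.inl h
      · right
        by_contra hne
        exact hcond ⟨h, by simpa [pvC] using hne⟩

-- one step of the prefix function: the port's new pi entry is sPhi cs l (m+1)
theorem sPhi_step (cs : List Char) (l m : Nat) (hm : 1 ≤ m) (pi : List Nat)
    (hpi : ∀ k', 1 ≤ k' → k' ≤ m → pi.getD (k'-1) 0 = sPhi cs l k') :
    (let k1 := pvFall cs l (cs.getD (l+m) ' ') (pi.getD (m-1) 0) pi (pi.getD (m-1) 0)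
     if cs.getD (l + k1) ' ' = cs.getD (l+m) ' ' then k1 + 1 else k1) = sPhi cs l (m+1) := by
  simp only []
  have hk0 : pi.getD (m-1) 0 = sPhi cs l m := hpi m hm (le_refl m)
  obtain ⟨hphlt, hphb⟩ := sPhi_spec cs l m hm
  have hspec := pvFall_spec cs l m (cs.getD (l+m) ' ') pi hpi (pi.getD (m-1) 0)
      (pi.getD (m-1) 0) (le_refl _) (by omega) (by rw [hk0]; exact hphb)
      (by intro b hbm hbb _; rw [hk0]; exact sPhi_greatest cs hbm hbb)
  rw [hk0] at hspec
  obtain ⟨hrm, hrb, hrmax, hror⟩ := hspec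
  rw [hk0]
  set r := pvFall cs l (cs.getD (l+m) ' ') (sPhi cs l m) pi (sPhi cs l m) with hr
  show (if cs.getD (l + r) ' ' = cs.getD (l+m) ' ' then r + 1 else r) = sPhi cs l (m+1)
  by_cases hmatch : cs.getD (l + r) ' ' = cs.getD (l+m) ' '
  · rw [if_pos hmatch]
    apply le_antisymm
    · exact sPhi_greatest cs (by omega)
        ((sBord_ext cs l m r (by omega)).2 ⟨hrb, hmatch⟩)
    · obtain ⟨hlt', hb'⟩ := sPhi_spec cs l (m+1) (by omega)
      rcases Nat.eq_zero_or_pos (sPhi cs l (m+1)) with h0 | hpos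
      · omega
      · obtain ⟨b, hbeq⟩ : ∃ b, sPhi cs l (m+1) = b + 1 := ⟨sPhi cs l (m+1) - 1, by omega⟩
        rw [hbeq] at hb' hlt' ⊢
        obtain ⟨hbb, hbc⟩ := (sBord_ext cs l m b (by omega)).1 hb'
        have := hrmax b (by omega) hbb hbc
        omega
  · rw [if_neg hmatch]
    have hr0 : r = 0 := by
      rcases hror with h | h
      · exact h
      · exact absurd h hmatch
    rw [hr0]
    symm
    rw [← Nat.le_zero]
    obtain ⟨hlt', hb'⟩ := sPhi_spec cs l (m+1) (by omega)
    rcases Nat.eq_zero_or_pos (sPhi cs l (m+1)) with h0 | hpos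
    · omega
    · obtain ⟨b, hbeq⟩ : ∃ b, sPhi cs l (m+1) = b + 1 := ⟨sPhi cs l (m+1) - 1, by omega⟩
      rw [hbeq] at hb' hlt'
      obtain ⟨hbb, hbc⟩ := (sBord_ext cs l m b (by omega)).1 hb'
      have hble := hrmax b (by omega) hbb hbc
      rw [hr0] at hble
      have hb0 : b = 0 := by omega
      rw [hb0] at hbc
      rw [hr0] at hmatch
      exact absurd hbc hmatch


-- ---------- greedy segmentation and partition feasibility (spec layer) ----------

-- the slice cs[j:i) is a usable segment under threshold X
abbrev sGood (cs : List Char) (X : Int) (j i : Nat) : Prop := (sPer cs j i : Int) ≤ X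

theorem sGood_mono (cs : List Char) {X : Int} {j j' i i' : Nat} (hj : j ≤ j') (hi : i' ≤ i)
    (h : sGood cs X j i) : sGood cs X j' i' :=
  le_trans (by exact_mod_cast Int.ofNat_le.2 (sPer_mono cs hj hi)) h

theorem sGood_succ (cs : List Char) {X : Int} (hX : 1 ≤ X) (j : Nat) : sGood cs X j (j+1) := by
  unfold sGood
  rw [sPer_succ_self]
  exact hX

-- farthest right end of a greedy segment starting at j
def sReach (cs : List Char) (n : Nat) (X : Int) (j : Nat) : Nat :=
  Nat.findGreatest (fun i => j < i ∧ sGood cs X j i) n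

theorem sReach_le (cs : List Char) (n : Nat) (X : Int) (j : Nat) : sReach cs n X j ≤ n :=
  Nat.findGreatest_le n

theorem sReach_gt (cs : List Char) {n : Nat} {X : Int} {j : Nat} (hj : j < n) (hX : 1 ≤ X) :
    j < sReach cs n X j :=
  Nat.lt_of_lt_of_le (Nat.lt_succ_self j)
    (Nat.le_findGreatest (by omega) ⟨Nat.lt_succ_self j, sGood_succ cs hX j⟩)

theorem sReach_good (cs : List Char) {n : Nat} {X : Int} {j : Nat} (hj : j < n) (hX : 1 ≤ X) :
    sGood cs X j (sReach cs n X j) :=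
  (Nat.findGreatest_spec (P := fun i => j < i ∧ sGood cs X j i) (m := j+1)
    (by omega) ⟨Nat.lt_succ_self j, sGood_succ cs hX j⟩).2

theorem sReach_max (cs : List Char) {n : Nat} {X : Int} {j i : Nat} (hi : i ≤ n)
    (hji : j < i) (hg : sGood cs X j i) : i ≤ sReach cs n X j :=
  Nat.le_findGreatest hi ⟨hji, hg⟩

-- greedy number of segments covering cs[j:n)
def sCnt (cs : List Char) (n : Nat) (X : Int) (j : Nat) : Nat :=
  if h : j < n ∧ 1 ≤ X then 1 + sCnt cs n X (sReach cs n X j) else 0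
  termination_by n - j
  decreasing_by
    have h1 := sReach_gt cs h.1 h.2
    have h2 := sReach_le cs n X j
    omega

-- partitions of cs[j:i) into at most k usable segments, peeling the last segment
def sPart (cs : List Char) (X : Int) : Nat → Nat → Nat → Prop
  | 0, j, i => j = i
  | k+1, j, i => sPart cs X k j i ∨ ∃ m, j ≤ m ∧ m < i ∧ sGood cs X m i ∧ sPart cs X k j m

theorem sPart_refl (cs : List Char) (X : Int) (k j : Nat) : sPart cs X k j j := by
  induction k with
  | zero => rfl
  | succ k ih => exact Or.inl ih

theorem sPart_succ (cs : List Char) {X : Int} {k j i : Nat} (h : sPart cs X k j i) :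
    sPart cs X (k+1) j i := Or.inl h

theorem sPart_mono_k (cs : List Char) {X : Int} {k k' j i : Nat} (hk : k ≤ k')
    (h : sPart cs X k j i) : sPart cs X k' j i := by
  induction hk with
  | refl => exact h
  | step _ ih => exact Or.inl ih

theorem sPart_le (cs : List Char) {X : Int} {k j i : Nat} (h : sPart cs X k j i) : j ≤ i := by
  induction k generalizing i with
  | zero => exact Nat.le_of_eq h
  | succ k ih =>
    rcases h with h | ⟨m, hjm, hmi, _, hp⟩
    · exact ih h
    · omega

theorem sPart_mono_left (cs : List Char) {X : Int} : ∀ (k j j' i : Nat),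
    sPart cs X k j i → j ≤ j' → j' ≤ i → sPart cs X k j' i := by
  intro k
  induction k with
  | zero =>
    intro j j' i h h1 h2
    have hji : j = i := h
    show j' = i
    omega
  | succ k ih =>
    intro j j' i h h1 h2
    rcases h with h | ⟨m, hjm, hmi, hg, hp⟩
    · exact Or.inl (ih j j' i h h1 h2)
    · rcases Nat.lt_or_ge m j' with hc | hc
      case inr => exact Or.inr ⟨m, hc, hmi, hg, ih j j' m hp h1 hc⟩
      rcases Nat.eq_or_lt_of_le h2 with he | hlt
      · rw [he]; exact sPart_refl cs X (k+1) i
      · exact Or.inr ⟨j', le_refl _, hlt, sGood_mono cs (Nat.le_of_lt hc) (le_refl _) hg,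
            sPart_refl cs X k j'⟩

-- prepend a first segment to a partition
theorem sPart_cons (cs : List Char) {X : Int} {k j m i : Nat} (hg : sGood cs X j m)
    (hjm : j < m) (hmi : m ≤ i) (hp : sPart cs X k m i) : sPart cs X (k+1) j i := by
  induction k generalizing m i with
  | zero =>
    have : m = i := hp
    subst this
    exact Or.inr ⟨j, le_refl _, hjm, hg, sPart_refl cs X 0 j⟩
  | succ k ih =>
    rcases hp with hp | ⟨mm, hmm1, hmm2, hgm, hpm⟩
    · exact sPart_succ cs (ih hg hjm hmi hp)
    · exact Or.inr ⟨mm, by omega, hmm2, hgm, ih hg hjm (by omega) hpm⟩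

-- peeling the first segment instead of the last
theorem sPart_first (cs : List Char) (X : Int) (k : Nat) : ∀ j i : Nat,
    sPart cs X (k+1) j i ↔
      (sPart cs X k j i ∨ ∃ m, j < m ∧ m ≤ i ∧ sGood cs X j m ∧ sPart cs X k m i) := by
  induction k with
  | zero =>
    intro j i
    constructor
    · rintro (h | ⟨m, hjm, hmi, hg, hp⟩)
      · exact Or.inl h
      · have : j = m := hp
        subst this
        exact Or.inr ⟨i, by omega, le_refl _, hg, rfl⟩
    · rintro (h | ⟨m, hjm, hmi, hg, hp⟩)
      · exact sPart_succ cs h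
      · exact sPart_cons cs hg hjm hmi hp
  | succ k ih =>
    intro j i
    constructor
    · rintro (h | ⟨m, hjm, hmi, hg, hp⟩)
      · exact Or.inl h
      · rcases Nat.eq_or_lt_of_le hjm with he | hlt
        · subst he
          exact Or.inr ⟨i, hmi, le_refl _, hg, sPart_refl cs X (k+1) i⟩
        · rcases (ih j m).1 hp with hsub | ⟨m', hm'1, hm'2, hg', hp'⟩
          · exact Or.inl (Or.inr ⟨m, hjm, hmi, hg, hsub⟩)
          · exact Or.inr ⟨m', hm'1, by omega, hg',
              Or.inr ⟨m, hm'2, hmi, hg, hp'⟩⟩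
    · rintro (h | ⟨m, hjm, hmi, hg, hp⟩)
      · exact sPart_succ cs h
      · exact sPart_cons cs hg hjm hmi hp

-- a partition never needs more than i - j segments
theorem sPart_cap (cs : List Char) {X : Int} {k j i : Nat} (h : sPart cs X k j i) :
    sPart cs X (i - j) j i ∨ j = i := by
  induction k generalizing i with
  | zero => exact Or.inr h
  | succ k ih =>
    rcases h with h | ⟨m, hjm, hmi, hg, hp⟩
    · exact ih h
    · rcases ih hp with hc | hc
      · left
        have h1 : sPart cs X (m - j + 1) j i := Or.inr ⟨m, hjm, hmi, hg, hc⟩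
        exact sPart_mono_k cs (by omega) h1
      · subst hc
        left
        have h1 : sPart cs X 1 j i := Or.inr ⟨j, le_refl _, hmi, hg, sPart_refl cs X 0 j⟩
        exact sPart_mono_k cs (by omega) h1

-- the greedy run itself is a partition
theorem sPart_of_cnt (cs : List Char) {n : Nat} {X : Int} (hX : 1 ≤ X) :
    ∀ j, j ≤ n → sPart cs X (sCnt cs n X j) j n := by
  have main : ∀ fuel j, n - j ≤ fuel → j ≤ n → sPart cs X (sCnt cs n X j) j n := by
    intro fuel
    induction fuel with
    | zero =>
      intro j h1 h2
      have hjn : j = n := by omega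
      subst hjn
      rw [sCnt, dif_neg (by omega)]
      rfl
    | succ fuel ih =>
      intro j h1 h2
      by_cases hj : j < n
      · have hgt := sReach_gt cs hj hX
        have hle := sReach_le cs n X j
        have hpart := ih (sReach cs n X j) (by omega) hle
        have hc := sPart_cons cs (sReach_good cs hj hX) hgt hle hpart
        rw [sCnt, dif_pos ⟨hj, hX⟩, Nat.add_comm]
        exact hc
      · have hjn : j = n := by omega
        subst hjn
        rw [sCnt, dif_neg (by omega)]
        rfl
  exact fun j hj => main (n+1) j (by omega) hj

-- greedy is optimal: no partition beats the greedy count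
theorem sCnt_le_of_part (cs : List Char) {n : Nat} {X : Int} (hX : 1 ≤ X) :
    ∀ k j, j ≤ n → sPart cs X k j n → sCnt cs n X j ≤ k := by
  intro k
  induction k with
  | zero =>
    intro j hj h
    have hjn : j = n := h
    subst hjn
    rw [sCnt, dif_neg (by omega)]
  | succ k ih =>
    intro j hj h
    rcases Nat.eq_or_lt_of_le hj with he | hjlt
    · subst he
      rw [sCnt, dif_neg (by omega)]
      omega
    · rcases (sPart_first cs X k j n).1 h with h1 | ⟨m, hm1, hm2, hg, hp⟩
      · exact le_trans (ih j hj h1) (by omega)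
      · have hmr : m ≤ sReach cs n X j := sReach_max cs hm2 hm1 hg
        have hrn : sReach cs n X j ≤ n := sReach_le cs n X j
        have hp' : sPart cs X k (sReach cs n X j) n := sPart_mono_left cs k m _ n hp hmr hrn
        have := ih (sReach cs n X j) hrn hp'
        rw [sCnt, dif_pos ⟨hjlt, hX⟩]
        omega

theorem sCnt_le_iff (cs : List Char) {n : Nat} {X : Int} (hX : 1 ≤ X) (k j : Nat)
    (hj : j ≤ n) : sCnt cs n X j ≤ k ↔ sPart cs X k j n :=
  ⟨fun h => sPart_mono_k cs h (sPart_of_cnt cs hX j hj), sCnt_le_of_part cs hX k j hj⟩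


-- ---------- alignment of port A with the spec ----------

theorem pvStep_eq (cs : List Char) (l m : Nat) (hm : 1 ≤ m) (pi : List Nat)
    (hpi : ∀ k', 1 ≤ k' → k' ≤ m → pi.getD (k'-1) 0 = sPhi cs l k') :
    pvStep cs l pi m (l + m) = sPhi cs l (m+1) := by
  have h := sPhi_step cs l m hm pi hpi
  simpa [pvStep, pvC] using h

theorem sPiTab_length (cs : List Char) (l m : Nat) : (sPiTab cs l m).length = m := by
  simp [sPiTab]

theorem getD_snoc (xs : List Nat) (a : Nat) : (xs ++ [a]).getD xs.length 0 = a := by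
  rw [List.getD_eq_getElem _ _ (by simp)]
  simp

theorem sCnt_pos_of_lt (cs : List Char) {n : Nat} {X : Int} {j : Nat} (hj : j < n)
    (hX : 1 ≤ X) : 1 ≤ sCnt cs n X j := by
  rw [sCnt, dif_pos ⟨hj, hX⟩]
  omega

-- the greedy segment that is still open ends exactly where the next period overflow occurs
theorem sReach_eq_of_break (cs : List Char) {n : Nat} {X : Int} {l i : Nat} (hli : l < i)
    (hin : i ≤ n) (hg : sGood cs X l i) (hbad : ¬ sGood cs X l (i+1)) :
    sReach cs n X l = i := by
  apply le_antisymm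
  · by_contra h
    push_neg at h
    have h1 : l < n := by omega
    have hXX : 1 ≤ X := le_trans (by exact_mod_cast Int.ofNat_le.2 (sPer_pos cs l i)) hg
    have h2 := sReach_good cs h1 hXX
    exact hbad (sGood_mono cs (le_refl l) (by omega) h2)
  · exact sReach_max cs hin hli hg

-- invariant of A's can-loop: position i = l + L, pi is the prefix-function table of the open
-- segment cs[l:i), which is still good; result = (segments so far - 1 + greedy count from l ≤ max 1 K)
theorem pvCanGo_eq (cs : List Char) (n : Nat) (K X : Int) (hX : 1 ≤ X) :
    ∀ fuel l L seg, n - (l + L) ≤ fuel → 1 ≤ L → l + L ≤ n →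
      sGood cs X l (l + L) → 1 ≤ seg → (seg = 1 ∨ seg ≤ K) →
      pvCanGo cs n K X (l + L) seg l (sPiTab cs l L) L =
        decide (seg - 1 + (sCnt cs n X l : Int) ≤ max 1 K) := by
  intro fuel
  induction fuel with
  | zero =>
    intro l L seg hfuel hL hln hg hseg1 hsegK
    have hin : l + L = n := by omega
    rw [pvCanGo, dif_neg (by omega)]
    have hreach : sReach cs n X l = n :=
      le_antisymm (sReach_le cs n X l) (sReach_max cs (le_refl n) (by omega) (hin ▸ hg))
    rw [sCnt, dif_pos ⟨by omega, hX⟩, hreach, sCnt, dif_neg (by omega)]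
    symm
    rw [decide_eq_true_eq]
    push_cast
    omega
  | succ fuel ih =>
    intro l L seg hfuel hL hln hg hseg1 hsegK
    by_cases hin : l + L < n
    case neg =>
      -- same terminal computation as the base case
      have hin' : l + L = n := by omega
      rw [pvCanGo, dif_neg (by omega)]
      have hreach : sReach cs n X l = n :=
        le_antisymm (sReach_le cs n X l) (sReach_max cs (le_refl n) (by omega) (hin' ▸ hg))
      rw [sCnt, dif_pos ⟨by omega, hX⟩, hreach, sCnt, dif_neg (by omega)]
      symm
      rw [decide_eq_true_eq]
      push_cast
      omega
    rw [pvCanGo, dif_pos hin]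
    have hL0 : ¬ (L = 0) := by omega
    rw [if_neg hL0]
    have hstep : pvStep cs l (sPiTab cs l L) L (l + L) = sPhi cs l (L+1) :=
      pvStep_eq cs l L hL (sPiTab cs l L) (fun k' h1 h2 => sPiTab_getD cs l L k' h1 h2)
    simp only [hstep]
    have hlen : (sPiTab cs l L ++ [sPhi cs l (L+1)]).getD ((L + 1) - 1) 0 = sPhi cs l (L+1) := by
      have := getD_snoc (sPiTab cs l L) (sPhi cs l (L+1))
      rw [sPiTab_length] at this
      simpa using this
    simp only [hlen]
    have hphi := (sPhi_spec cs l (L+1) (by omega)).1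
    have hper : sPer cs l (l + (L+1)) = (L+1) - sPhi cs l (L+1) :=
      sPer_eq_sub_phi cs l (L+1) (by omega)
    have hpercast : ((L+1 : Nat) : Int) - ((sPhi cs l (L+1) : Nat) : Int) =
        ((sPer cs l (l + (L+1)) : Nat) : Int) := by
      rw [hper]
      push_cast
      omega
    by_cases hbr : ((L+1 : Nat) : Int) - ((sPhi cs l (L+1) : Nat) : Int) > X
    case pos =>
      have hbad : ¬ sGood cs X l (l + L + 1) := by
        unfold sGood
        rw [show l + L + 1 = l + (L+1) by omega]
        omega
      rw [if_pos (by push_cast; push_cast at hbr; omega)]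
      have hreach : sReach cs n X l = l + L :=
        sReach_eq_of_break cs (by omega) (by omega) hg (by rwa [show l + L + 1 = (l+L) + 1 by omega] at hbad)
      have hcnt : sCnt cs n X l = 1 + sCnt cs n X (l + L) := by
        rw [sCnt, dif_pos ⟨by omega, hX⟩, hreach]
      by_cases hK : seg + 1 > K
      case pos =>
        rw [if_pos hK]
        symm
        rw [decide_eq_false_iff_not]
        have h1 := sCnt_pos_of_lt cs (j := l + L) hin hX
        rw [hcnt]
        push_cast
        omega
      case neg =>
        rw [if_neg hK]
        have hrec := ih (l + L) 1 (seg + 1) (by omega) (le_refl 1) (by omega)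
          (sGood_succ cs hX (l + L)) (by omega) (Or.inr (by omega))
        have htab1 : sPiTab cs (l + L) 1 = [0] := by
          unfold sPiTab
          simp [sPhi_one]
        rw [htab1] at hrec
        rw [show l + L + 1 = (l + L) + 1 by omega] at hrec ⊢
        rw [hrec, hcnt]
        rw [show seg + 1 - 1 + ((sCnt cs n X (l + L) : Nat) : Int)
              = seg - 1 + ((1 + sCnt cs n X (l + L) : Nat) : Int) by push_cast; ring]
    case neg =>
      rw [if_neg hbr]
      have hgood : sGood cs X l (l + (L+1)) := by
        unfold sGood
        omega
      have hrec := ih l (L+1) seg (by omega) (by omega) (by omega) hgood hseg1 hsegK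
      rw [sPiTab_succ] at hrec
      rw [show l + L + 1 = l + (L+1) by omega]
      exact hrec

-- A's can: for 1 ≤ X it tests whether the greedy count stays within max 1 K
theorem pvCan_eq (cs : List Char) (n : Nat) (K X : Int) (hX : 1 ≤ X) (hn : 1 ≤ n) :
    pvCan cs n K X = decide ((sCnt cs n X 0 : Int) ≤ max 1 K) := by
  unfold pvCan
  rw [pvCanGo, dif_pos (by omega : (0:Nat) < n)]
  rw [if_pos rfl]
  have h1 : ¬ ((((1:Nat) : Int) - (([0].getD 0 0 : Nat) : Int)) > X) := by
    simp
    omega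
  rw [if_neg (by simpa using h1)]
  have htab1 : sPiTab cs 0 1 = [0] := by
    unfold sPiTab
    simp [sPhi_one]
  have := pvCanGo_eq cs n K X hX n 0 1 1 (by omega) (le_refl 1) (by omega)
    (sGood_succ cs hX 0) (le_refl 1) (Or.inl rfl)
  rw [htab1] at this
  simp only [show (0:Nat) + 1 = 1 from rfl] at this
  rw [this]
  rw [show (1:Int) - 1 + ((sCnt cs n X 0 : Nat) : Int) = ((sCnt cs n X 0 : Nat) : Int) by ring]


-- ---------- alignment of port B's per-rows with the spec ----------

theorem pvFallB_eq (cs : List Char) (j t : Nat) :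
    ∀ fuel pi k, pvFallB cs j t fuel pi k = pvFall cs j (cs.getD (j + t) ' ') fuel pi k := by
  intro fuel
  induction fuel with
  | zero => intro pi k; rfl
  | succ fuel ih =>
    intro pi k
    rw [pvFallB, pvFall]
    have hiff : (0 < k ∧ cs.getD (j + t) ' ' ≠ cs.getD (j + k) ' ') ↔
        (0 < k ∧ pvC cs (j + k) ≠ cs.getD (j + t) ' ') := by
      unfold pvC
      constructor
      · rintro ⟨h1, h2⟩; exact ⟨h1, fun h => h2 h.symm⟩
      · rintro ⟨h1, h2⟩; exact ⟨h1, fun h => h2 h.symm⟩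
    by_cases hc : 0 < k ∧ cs.getD (j + t) ' ' ≠ cs.getD (j + k) ' '
    · rw [if_pos hc, if_pos (hiff.1 hc)]
      exact ih pi _
    · rw [if_neg hc, if_neg (fun h => hc (hiff.2 h))]

theorem pvRowStep_eq (cs : List Char) (j m : Nat) (hm : 1 ≤ m) (row : List Int) :
    pvRowStep cs j (sPiTab cs j m, sPhi cs j m, row) m =
      (sPiTab cs j (m+1), sPhi cs j (m+1),
        row ++ [((m:Int) + 1) - (sPhi cs j (m+1) : Int)]) := by
  unfold pvRowStep
  simp only []
  rw [pvFallB_eq]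
  have hgd : (sPiTab cs j m).getD (m-1) 0 = sPhi cs j m := sPiTab_getD cs j m m hm (le_refl m)
  have hstep := sPhi_step cs j m hm (sPiTab cs j m) (fun k' h1 h2 => sPiTab_getD cs j m k' h1 h2)
  rw [hgd] at hstep
  simp only [] at hstep
  have hstep' : (if cs.getD (j + m) ' ' =
        cs.getD (j + pvFall cs j (cs.getD (j + m) ' ') (sPhi cs j m) (sPiTab cs j m) (sPhi cs j m)) ' '
      then pvFall cs j (cs.getD (j + m) ' ') (sPhi cs j m) (sPiTab cs j m) (sPhi cs j m) + 1
      else pvFall cs j (cs.getD (j + m) ' ') (sPhi cs j m) (sPiTab cs j m) (sPhi cs j m)) =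
      sPhi cs j (m+1) := (if_congr eq_comm rfl rfl).trans hstep
  rw [hstep']
  rw [sPiTab_succ]

-- the fold of per_row, after c steps
theorem pvPerRow_fold (cs : List Char) (n j : Nat) :
    ∀ c, (List.range' 1 c).foldl (pvRowStep cs j)
        ([0], 0, (List.replicate (j+1) (0:Int)) ++ [1]) =
      (sPiTab cs j (c+1), sPhi cs j (c+1),
        (List.replicate (j+1) (0:Int)) ++
          (List.range' (j+1) (c+1)).map (fun i => ((sPer cs j i : Nat) : Int))) := by
  intro c
  induction c with
  | zero =>
    have h1 : sPiTab cs j 1 = [0] := by unfold sPiTab; simp [sPhi_one]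
    have h2 : sPhi cs j 1 = 0 := sPhi_one cs j
    have h3 : List.range' (j+1) 1 = [j+1] := List.range'_one
    have h4 : sPer cs j (j+1) = 1 := sPer_succ_self cs j
    simp [h1, h2, h3, h4]
  | succ c ih =>
    have hsplit : List.range' 1 (c+1) = List.range' 1 c ++ [1 + c] := by
      simpa using List.range'_concat (s := 1) (n := c) (step := 1)
    rw [hsplit, List.foldl_append, ih]
    simp only [List.foldl_cons, List.foldl_nil]
    rw [show 1 + c = c + 1 by omega]
    rw [pvRowStep_eq cs j (c+1) (by omega)]
    have hsplit2 : List.range' (j+1) (c+1+1) = List.range' (j+1) (c+1) ++ [(j+1) + (c+1)] := by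
      simpa using List.range'_concat (s := j+1) (n := c+1) (step := 1)
    rw [hsplit2, List.map_append, ← List.append_assoc]
    have hphi := (sPhi_spec cs j (c+1+1) (by omega)).1
    have hper : sPer cs j (j + (c+1+1)) = (c+1+1) - sPhi cs j (c+1+1) :=
      sPer_eq_sub_phi cs j (c+1+1) (by omega)
    have hval : ((c+1 : Nat) : Int) + 1 - ((sPhi cs j (c+1+1) : Nat) : Int) =
        ((sPer cs j ((j+1) + (c+1)) : Nat) : Int) := by
      rw [show (j+1) + (c+1) = j + (c+1+1) by omega, hper]
      push_cast
      omega
    simp only [List.map_cons, List.map_nil]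
    rw [← hval]


theorem pvPerRow_eq (cs : List Char) (n j : Nat) (hj : j < n) :
    pvPerRow cs n j = (List.replicate (j+1) (0:Int)) ++
      (List.range' (j+1) (n-j)).map (fun i => ((sPer cs j i : Nat) : Int)) := by
  unfold pvPerRow
  simp only []
  rw [pvPerRow_fold cs n j (n - j - 1)]
  rw [show n - j - 1 + 1 = n - j by omega]

theorem pvPerRow_getD (cs : List Char) (n j i : Nat) (hj : j < n) (hji : j < i)
    (hin : i ≤ n) : (pvPerRow cs n j).getD i 0 = ((sPer cs j i : Nat) : Int) := by
  rw [pvPerRow_eq cs n j hj]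
  unfold List.getD
  rw [List.getElem?_append_right (by simp; omega)]
  simp only [List.length_replicate]
  rw [List.getElem?_eq_getElem (by simp; omega)]
  simp only [List.getElem_map, List.getElem_range', Option.getD_some]
  congr 2
  omega

-- ---------- the DP (spec layer) and its bridge to port B ----------

def sDp (cs : List Char) (n : Nat) : Nat → Nat → Int
  | 0, i => if i = 0 then 0 else ((n:Int)+1)
  | k+1, i => if i = 0 then 0 else
      min (pvPyMin ((List.range i).map (fun j =>
        max (sDp cs n k j) ((sPer cs j i : Nat) : Int)))) (sDp cs n k i)

theorem getD_map_range_int (n i : Nat) (f : Nat → Int) (h : i < n) :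
    ((List.range n).map f).getD i 0 = f i := by
  rw [List.getD_eq_getElem _ _ (by simpa using h)]
  simp

theorem getD_map_range_row (n i : Nat) (f : Nat → List Int) (h : i < n) :
    ((List.range n).map f).getD i [] = f i := by
  rw [List.getD_eq_getElem _ _ (by simpa using h)]
  simp

theorem range_succ_cons (n : Nat) : List.range (n+1) = 0 :: List.range' 1 n := by
  rw [List.range_eq_range', List.range'_succ]

-- the dp list after r rounds is the table of sDp · r
theorem pvDp_iterate (cs : List Char) (n : Nat) :
    ∀ r, ((pvDpStep ((List.range n).map (pvPerRow cs n)) n)^[r]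
        ((0:Int) :: List.replicate n ((n:Int) + 1))) =
      (List.range (n+1)).map (sDp cs n r) := by
  have hmap0 : (List.range (n+1)).map (sDp cs n 0) = (0:Int) :: List.replicate n ((n:Int)+1) := by
    rw [range_succ_cons, List.map_cons]
    congr 1
    rw [List.eq_replicate_iff]
    refine ⟨by simp, ?_⟩
    intro a ha
    rw [List.mem_map] at ha
    obtain ⟨i, hi, rfl⟩ := ha
    rw [List.mem_range'_1] at hi
    simp only [sDp]
    rw [if_neg (by omega)]
  have hstep : ∀ k, pvDpStep ((List.range n).map (pvPerRow cs n)) n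
      ((List.range (n+1)).map (sDp cs n k)) = (List.range (n+1)).map (sDp cs n (k+1)) := by
    intro k
    unfold pvDpStep
    conv_rhs => rw [range_succ_cons, List.map_cons]
    congr 1
    apply List.map_congr_left
    intro i hi
    simp only [List.mem_range'_1] at hi
    have hgetd : ∀ j, j < n + 1 →
        ((List.range (n+1)).map (sDp cs n k)).getD j 0 = sDp cs n k j := by
      intro j hj
      exact getD_map_range_int (n+1) j _ hj
    rw [hgetd i (by omega)]
    have hinner : (List.range i).map (fun j =>
          max (((List.range (n+1)).map (sDp cs n k)).getD j 0)
            ((((List.range n).map (pvPerRow cs n)).getD j []).getD i 0)) =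
        (List.range i).map (fun j => max (sDp cs n k j) ((sPer cs j i : Nat) : Int)) := by
      apply List.map_congr_left
      intro j hj
      rw [List.mem_range] at hj
      rw [hgetd j (by omega)]
      rw [getD_map_range_row n j _ (by omega)]
      rw [pvPerRow_getD cs n j i (by omega) (by omega) (by omega)]
    rw [hinner]
    simp only [sDp]
    rw [if_neg (by omega)]
  intro r
  induction r with
  | zero => simpa using hmap0.symm
  | succ r ih =>
    rw [Function.iterate_succ_apply', ih, hstep]

theorem pvPyMin_cons (x : Int) (r : List Int) : pvPyMin (x :: r) = r.foldl min x := rfl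

theorem foldl_min_le_iff : ∀ (r : List Int) (x X : Int),
    (r.foldl min x ≤ X ↔ ∃ a ∈ x :: r, a ≤ X) := by
  intro r
  induction r with
  | nil => intro x X; simp
  | cons y r ih =>
    intro x X
    rw [List.foldl_cons]
    rw [ih (min x y)]
    simp only [List.mem_cons]
    constructor
    · rintro ⟨a, ha, hle⟩
      rcases ha with rfl | ha
      · rcases min_le_iff.1 hle with h | h
        · exact ⟨x, Or.inl rfl, h⟩
        · exact ⟨y, Or.inr (Or.inl rfl), h⟩
      · exact ⟨a, Or.inr (Or.inr ha), hle⟩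
    · rintro ⟨a, ha, hle⟩
      rcases ha with h1 | h1 | h1
      · exact ⟨min x y, Or.inl rfl, le_trans (min_le_left _ _) (h1 ▸ hle)⟩
      · exact ⟨min x y, Or.inl rfl, le_trans (min_le_right _ _) (h1 ▸ hle)⟩
      · exact ⟨a, Or.inr h1, hle⟩

-- python min over a nonempty list
theorem pvPyMin_le_iff (x : Int) (r : List Int) (X : Int) :
    pvPyMin (x :: r) ≤ X ↔ ∃ a ∈ x :: r, a ≤ X := by
  rw [pvPyMin_cons]
  exact foldl_min_le_iff r x X

-- the dp value is the minimax over partitions: level sets agree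
theorem sDp_le_iff (cs : List Char) (n : Nat) (X : Int) (hX0 : 0 ≤ X) (hXn : X ≤ (n:Int)) :
    ∀ k i, i ≤ n → (sDp cs n k i ≤ X ↔ sPart cs X k 0 i) := by
  intro k
  induction k with
  | zero =>
    intro i hin
    unfold sDp
    by_cases hi : i = 0
    · subst hi
      constructor
      · intro _; exact sPart_refl cs X 0 0
      · intro _; exact hX0
    · rw [if_neg hi]
      constructor
      · intro h; omega
      · intro h
        exact absurd (sPart_le cs h) (by have : (0:Nat) = i := h; omega)
  | succ k ih =>
    intro i hin
    unfold sDp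
    by_cases hi : i = 0
    · subst hi
      constructor
      · intro _; exact sPart_refl cs X (k+1) 0
      · intro _; exact hX0
    · rw [if_neg hi]
      rw [min_le_iff]
      have hne : (List.range i).map (fun j => max (sDp cs n k j) ((sPer cs j i : Nat) : Int)) ≠ [] := by
        simp
        omega
      constructor
      · rintro (h | h)
        · obtain ⟨x, r, hxr⟩ : ∃ x r, (List.range i).map (fun j =>
              max (sDp cs n k j) ((sPer cs j i : Nat) : Int)) = x :: r := by
            rcases hl : (List.range i).map (fun j => max (sDp cs n k j) ((sPer cs j i : Nat) : Int)) with _ | ⟨x, r⟩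
            · exact absurd hl hne
            · exact ⟨x, r, rfl⟩
          rw [hxr] at h
          rw [pvPyMin_le_iff] at h
          rw [← hxr] at h
          obtain ⟨a, ha, hle⟩ := h
          rw [List.mem_map] at ha
          obtain ⟨j, hj, rfl⟩ := ha
          rw [List.mem_range] at hj
          rw [max_le_iff] at hle
          exact Or.inr ⟨j, by omega, by omega, hle.2, (ih j (by omega)).1 hle.1⟩
        · exact Or.inl ((ih i hin).1 h)
      · intro h
        rcases h with h | ⟨m, hm0, hmi, hg, hp⟩
        · exact Or.inr ((ih i hin).2 h)
        · left
          obtain ⟨x, r, hxr⟩ : ∃ x r, (List.range i).map (fun j =>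
              max (sDp cs n k j) ((sPer cs j i : Nat) : Int)) = x :: r := by
            rcases hl : (List.range i).map (fun j => max (sDp cs n k j) ((sPer cs j i : Nat) : Int)) with _ | ⟨x, r⟩
            · exact absurd hl hne
            · exact ⟨x, r, rfl⟩
          rw [hxr, pvPyMin_le_iff, ← hxr]
          refine ⟨max (sDp cs n k m) ((sPer cs m i : Nat) : Int), ?_, ?_⟩
          · rw [List.mem_map]
            exact ⟨m, by rw [List.mem_range]; omega, rfl⟩
          · rw [max_le_iff]
            exact ⟨(ih m (by omega)).2 hp, hg⟩

-- with a nonpositive threshold no segment is usable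
theorem sPart_nonpos (cs : List Char) {X : Int} (hX : X ≤ 0) :
    ∀ k j i, sPart cs X k j i → j = i := by
  intro k
  induction k with
  | zero => intro j i h; exact h
  | succ k ih =>
    intro j i h
    rcases h with h | ⟨m, _, _, hg, _⟩
    · exact ih j i h
    · have h1 := sPer_pos cs m i
      unfold sGood at hg
      omega

-- partitions of the whole string cap at n segments
theorem sPart_cap_n (cs : List Char) {X : Int} {n : Nat} (hn : 1 ≤ n) (a b : Nat)
    (hab : min a n = min b n) (h : sPart cs X a 0 n) : sPart cs X b 0 n := by
  rcases sPart_cap cs h with hc | hc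
  · rcases Nat.lt_or_ge n b with hb | hb
    · have hcn : sPart cs X n 0 n := by simpa using hc
      exact sPart_mono_k cs (by omega) hcn
    · have ha' : sPart cs X (min a n) 0 n := by
        rcases Nat.lt_or_ge a n with ha | ha
        · rw [Nat.min_eq_left (Nat.le_of_lt ha)]; exact h
        · rw [Nat.min_eq_right ha]
          simpa using hc
      rw [hab, Nat.min_eq_left hb] at ha'
      exact ha'
  · omega


-- ---------- the binary search ----------

theorem pvBS_eq (cs : List Char) (n : Nat) (K : Int) (V : Int)
    (hcan : ∀ X : Int, 1 ≤ X → X ≤ (n:Int) - 1 → (pvCan cs n K X = true ↔ V ≤ X)) :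
    ∀ d : Nat, ∀ lo hi : Int, (hi - lo).toNat ≤ d → 0 ≤ lo → lo < V → V ≤ hi →
      hi ≤ (n:Int) → pvBS cs n K lo hi = V := by
  intro d
  induction d with
  | zero =>
    intro lo hi h1 h2 h3 h4 h5
    exfalso
    omega
  | succ d ih =>
    intro lo hi h1 h2 h3 h4 h5
    rw [pvBS]
    by_cases hlh : lo + 1 < hi
    · rw [dif_pos hlh]
      have hmid1 := (PySem.Int.le_floordiv_iff_mul_le (a := lo + hi) (b := 2) (q := lo+1)
        (by omega)).2 (by omega)
      have hmid2 := (PySem.Int.floordiv_lt_iff_lt_mul (a := lo + hi) (b := 2) (q := hi)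
        (by omega)).2 (by omega)
      set mid := PySem.Int.floordiv (lo + hi) 2 with hmid
      have hcm := hcan mid (by omega) (by omega)
      by_cases hc : pvCan cs n K mid = true
      · rw [if_pos hc]
        exact ih lo mid (by omega) h2 h3 (hcm.1 hc) (by omega)
      · rw [if_neg hc]
        have hnv : ¬ V ≤ mid := fun h => hc (hcm.2 h)
        exact ih mid hi (by omega) (by omega) (by omega) h4 h5
    · rw [dif_neg hlh]
      omega

-- ===== VERDICT (by name: the statement is the Claim_ definition above) =====
theorem solve_spec : Claim_equal_solve := by
  unfold Claim_equal_solve Spec_solve Pre_solve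
  intro N K S _hdom hpre
  obtain ⟨hN0, _hNlen⟩ := hpre
  set cs := S.toList with hcs
  set n := N.toNat with hn
  by_cases hNz : N ≤ 0
  · have hN : N = 0 := le_antisymm hNz hN0
    unfold solve solve_alt
    rw [pvBS, dif_neg (by omega)]
    rw [if_pos hNz, hN]
  · have hn1 : 1 ≤ n := by omega
    have hNn : (n : Int) = N := by omega
    set kf := (max 1 (min K N)).toNat with hkf
    have hkf1 : 1 ≤ kf := by omega
    set V := sDp cs n kf n with hV
    -- upper bound: one segment is always allowed
    have hgood0n : sGood cs ((n:Nat) : Int) 0 n := by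
      unfold sGood
      have := sPer_le cs 0 n
      omega
    have hpart1 : sPart cs ((n:Nat) : Int) kf 0 n := by
      apply sPart_mono_k cs hkf1
      exact Or.inr ⟨0, le_refl 0, by omega, hgood0n, rfl⟩
    have hVn : V ≤ ((n:Nat) : Int) :=
      (sDp_le_iff cs n ((n:Nat) : Int) (by omega) (le_refl _) kf n (le_refl n)).2 hpart1
    -- lower bound: threshold 0 admits no partition
    have hV1 : 1 ≤ V := by
      by_contra h
      have h0 : sDp cs n kf n ≤ 0 := by omega
      have := (sDp_le_iff cs n 0 (le_refl 0) (by omega) kf n (le_refl n)).1 h0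
      have := sPart_nonpos cs (le_refl 0) kf 0 n this
      omega
    -- A's can agrees with the dp level sets
    have hcan : ∀ X : Int, 1 ≤ X → X ≤ (n:Int) - 1 → (pvCan cs n K X = true ↔ V ≤ X) := by
      intro X hX1 hXb
      rw [pvCan_eq cs n K X hX1 hn1, decide_eq_true_eq]
      have h1 : (((sCnt cs n X 0 : Nat) : Int) ≤ max 1 K) ↔
          sCnt cs n X 0 ≤ (max 1 K).toNat := by omega
      rw [h1, sCnt_le_iff cs hX1 _ 0 (Nat.zero_le n)]
      have h2 : sPart cs X ((max 1 K).toNat) 0 n ↔ sPart cs X kf 0 n :=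
        ⟨sPart_cap_n cs hn1 _ _ (by omega), sPart_cap_n cs hn1 _ _ (by omega)⟩
      rw [h2, ← sDp_le_iff cs n X (by omega) (by omega) kf n (le_refl n)]
    -- port A returns V
    have hA : solve N K S = V := by
      unfold solve
      exact pvBS_eq cs n K V hcan (N.toNat + 1) 0 N (by omega) (le_refl 0) hV1
        (by omega) (by omega)
    -- port B returns V
    have hB : solve_alt N K S = V := by
      unfold solve_alt
      rw [if_neg hNz]
      simp only []
      rw [show N + 1 = ((n:Nat) : Int) + 1 by omega]
      rw [pvDp_iterate cs n ((max 1 (min K N)).toNat)]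
      exact getD_map_range_int (n+1) n _ (by omega)
    rw [hA, hB]
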